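-- pv_equiv track=rewrite | github.com/skp96/Tic-Tac-Toe | core_tic_tac_toe/display.py | __generate_vertical_bars
-- ===== SOURCE A (Python) =====
-- def __generate_vertical_bars(move):
--     vertical_bars = ""
--
--     for idx in range(0, len(move)):
--         if idx != len(move) - 1:
--             vertical_bars += "          |"
--         else:
--             vertical_bars += "          \n"
--
--     return vertical_bars
-- ===== SOURCE B (Python) =====
-- def __generate_vertical_bars(move):
--     if not move:
--         return ""
--     return "          |" * (len(move) - 1) + "          \n"
-- ===== Notes on version B (the rewrite author's own statement) =====
-- stated objective: simpler
-- what changed: Replaces the index loop with a closed form: repeat the separator block len(move)-1 times by string multiplication and append the newline block once (empty input returns the empty string); measured faster by avoiding per-iteration concatenation.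
import Mathlib
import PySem

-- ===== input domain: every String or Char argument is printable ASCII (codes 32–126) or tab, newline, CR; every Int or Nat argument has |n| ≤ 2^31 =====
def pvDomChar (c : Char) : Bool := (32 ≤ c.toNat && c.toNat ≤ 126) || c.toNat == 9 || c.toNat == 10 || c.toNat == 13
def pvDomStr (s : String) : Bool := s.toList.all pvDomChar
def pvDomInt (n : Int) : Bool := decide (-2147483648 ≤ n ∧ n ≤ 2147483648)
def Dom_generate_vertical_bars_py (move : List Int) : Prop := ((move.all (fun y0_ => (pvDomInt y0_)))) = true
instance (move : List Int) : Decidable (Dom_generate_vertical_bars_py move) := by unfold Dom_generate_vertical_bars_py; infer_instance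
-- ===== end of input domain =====

-- B replaces the index loop with a closed form (separator block repeated len-1 times, newline block once); simpler.

-- ===== PORT A =====
def generate_vertical_bars_py (move : List Int) : String :=
  (PySem.List.pyRange 0 (move.length : Int) 1).foldl
    (fun vertical_bars idx =>
      if idx ≠ (move.length : Int) - 1 then vertical_bars ++ "          |"
      else vertical_bars ++ "          \n") ""

-- ===== PORT B =====
def generate_vertical_bars_py_alt (move : List Int) : String :=
  if move.isEmpty then ""
  else String.join (List.replicate (move.length - 1) "          |") ++ "          \n"

-- ===== PRECONDITION & SPEC =====
def Spec_generate_vertical_bars_py (move : List Int) (out : String) : Prop := out = generate_vertical_bars_py_alt move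
instance (move : List Int) (out : String) : Decidable (Spec_generate_vertical_bars_py move out) := by unfold Spec_generate_vertical_bars_py; infer_instance

-- ===== CLAIM (what is proved, stated in full; the proofs are below) =====
def Claim_equal_generate_vertical_bars_py : Prop := ∀ (move : List Int), Dom_generate_vertical_bars_py move → Spec_generate_vertical_bars_py move (generate_vertical_bars_py move)

-- ===== LEMMAS AND PROOFS =====

-- the prefix of the loop: every index is below len-1, so each step appends the separator block
theorem pv_prefix_fold (s t : String) (L : Int) :
    ∀ (m : Nat) (acc : String), (m : Int) ≤ L →
      (List.range m).foldl (fun vb (k : Nat) => if (k : Int) ≠ L then vb ++ s else vb ++ t) acc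
        = acc ++ String.join (List.replicate m s) := by
  intro m
  induction m with
  | zero => intro acc _; simp [String.join]
  | succ m ih =>
    intro acc h
    rw [List.range_succ, List.foldl_append]
    rw [ih acc (by omega)]
    have hm : ((m : Int) ≠ L) := by omega
    simp only [List.foldl_cons, List.foldl_nil, if_pos hm]
    rw [List.replicate_succ']
    simp [String.join, String.append_assoc]

theorem generate_vertical_bars_py_spec : Claim_equal_generate_vertical_bars_py := by
  intro move _
  unfold Spec_generate_vertical_bars_py generate_vertical_bars_py generate_vertical_bars_py_alt
  rw [PySem.List.pyRange_zero_nat, List.foldl_map]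
  cases hmv : move with
  | nil => simp
  | cons x xs =>
    have hlen : move.length = xs.length + 1 := by rw [hmv]; simp
    rw [← hmv, hlen]
    have hne : (x :: xs).isEmpty = false := by simp
    rw [hmv, hne]; rw [← hmv, hlen] at *
    simp only [Bool.false_eq_true, if_false]
    rw [List.range_succ, List.foldl_append,
        pv_prefix_fold "          |" "          \n" (((xs.length + 1 : Nat) : Int) - 1) xs.length "" (by push_cast; omega)]
    have heq : ((xs.length : Int)) = ((xs.length + 1 : Nat) : Int) - 1 := by push_cast; omega
    simp only [List.foldl_cons, List.foldl_nil, heq, ne_eq, not_true_eq_false, if_false]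
    simp
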